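-- pv_equiv track=rewrite | github.com/kirameister/ibus-pskk | src/util.py | add_feature_trigram_left
-- ===== SOURCE A (Python) =====
-- def add_feature_trigram_left(tokens):
--     """Add left trigram feature: two left neighbors plus the current token.
--
--     Each element is a space-separated string of the two left neighbors
--     and the current token. Uses 'BOS' for positions before the start.
--
--     Args:
--         tokens: List of tokens from tokenize_line()
--
--     Returns:
--         List of strings (same length as tokens)
--
--     Example:
--         add_feature_trigram_left(['あ', 'い', 'う', 'え'])
--         → ['BOS BOS あ', 'BOS あ い', 'あ い う', 'い う え']
--     """
--     if not tokens:
--         return []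
--     # Prepend two BOS markers
--     left2 = ['BOS', 'BOS'] + list(tokens[:-2]) if len(tokens) > 2 else ['BOS'] * len(tokens)
--     left1 = ['BOS'] + list(tokens[:-1])
--
--     # Handle edge cases for short sequences
--     if len(tokens) == 1:
--         return ['BOS BOS ' + tokens[0]]
--     elif len(tokens) == 2:
--         return ['BOS BOS ' + tokens[0], 'BOS ' + tokens[0] + ' ' + tokens[1]]
--
--     return [f'{l2} {l1} {t}' for l2, l1, t in zip(left2, left1, tokens)]
-- ===== SOURCE B (Python) =====
-- def add_feature_trigram_left(tokens):
--     """Single pass with a rolling (prev2, prev1) window primed with BOS sentinels."""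
--     out = []
--     prev2, prev1 = 'BOS', 'BOS'
--     for t in tokens:
--         out.append(f'{prev2} {prev1} {t}')
--         prev2, prev1 = prev1, t
--     return out
-- ===== Notes on version B (the rewrite author's own statement) =====
-- stated objective: simpler
-- what changed: Replaces the two shifted-list constructions, the zip, and the len==1/len==2 special cases with a single pass carrying a rolling (prev2, prev1) window primed with two BOS sentinels.
import Mathlib
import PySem

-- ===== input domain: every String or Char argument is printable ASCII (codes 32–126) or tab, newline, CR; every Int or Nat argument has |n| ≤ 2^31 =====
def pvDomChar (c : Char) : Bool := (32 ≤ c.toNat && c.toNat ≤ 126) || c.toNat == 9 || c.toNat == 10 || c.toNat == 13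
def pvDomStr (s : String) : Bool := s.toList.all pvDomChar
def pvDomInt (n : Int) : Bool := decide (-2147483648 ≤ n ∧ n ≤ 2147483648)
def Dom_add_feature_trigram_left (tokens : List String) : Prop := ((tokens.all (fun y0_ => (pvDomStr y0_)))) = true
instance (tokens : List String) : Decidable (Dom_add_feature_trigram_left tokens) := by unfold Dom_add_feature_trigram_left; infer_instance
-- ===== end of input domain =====

-- B replaces A's shifted-list/zip construction and its short-sequence special cases by one
-- rolling-window pass; objective: simpler.

-- ===== PORT A =====
def add_feature_trigram_left (tokens : List String) : List String :=
  if tokens = [] then []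
  else
    -- Prepend two BOS markers
    let left2 : List String :=
      if 2 < (tokens.length : Int) then
        ["BOS", "BOS"] ++ PySem.List.slice tokens none (some (-2))
      else List.replicate tokens.length "BOS"
    let left1 : List String := ["BOS"] ++ PySem.List.slice tokens none (some (-1))
    -- Handle edge cases for short sequences
    if tokens.length = 1 then
      ["BOS BOS " ++ PySem.List.pyGetD tokens 0 ""]
    else if tokens.length = 2 then
      ["BOS BOS " ++ PySem.List.pyGetD tokens 0 "",
       "BOS " ++ PySem.List.pyGetD tokens 0 "" ++ " " ++ PySem.List.pyGetD tokens 1 ""]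
    else
      ((left2.zip left1).zip tokens).map (fun p => p.1.1 ++ " " ++ p.1.2 ++ " " ++ p.2)

-- ===== PORT B =====
def trigramGo (prev2 prev1 : String) : List String → List String
  | [] => []
  | t :: ts => (prev2 ++ " " ++ prev1 ++ " " ++ t) :: trigramGo prev1 t ts

def add_feature_trigram_left_alt (tokens : List String) : List String :=
  trigramGo "BOS" "BOS" tokens

-- ===== PRECONDITION & SPEC =====
def Spec_add_feature_trigram_left (tokens : List String) (out : List String) : Prop := out = add_feature_trigram_left_alt tokens
instance (tokens : List String) (out : List String) : Decidable (Spec_add_feature_trigram_left tokens out) := by unfold Spec_add_feature_trigram_left; infer_instance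

-- ===== CLAIM (what is proved, stated in full; the proofs are below) =====
def Claim_equal_add_feature_trigram_left : Prop := ∀ (tokens : List String), Dom_add_feature_trigram_left tokens → Spec_add_feature_trigram_left tokens (add_feature_trigram_left tokens)

-- ===== LEMMAS AND PROOFS =====

-- B's rolling window equals a zip3-style combination of the twice- and once-shifted full lists.
theorem trigramGo_eq_zip (ts : List String) : ∀ (p2 p1 : String),
    trigramGo p2 p1 ts
      = (((p2 :: p1 :: ts).zip (p1 :: ts)).zip ts).map
          (fun p => p.1.1 ++ " " ++ p.1.2 ++ " " ++ p.2) := by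
  induction ts with
  | nil => intro p2 p1; rfl
  | cons t ts ih =>
      intro p2 p1
      simp only [trigramGo, List.zip_cons_cons, List.map_cons]
      rw [ih p1 t]
      simp [List.zip_cons_cons]

-- zipping against the lists truncated to the partner's length changes nothing
-- zipping truncated shifted lists equals zipping the full ones, when the final list is shortest
theorem zip_take_take {α β γ : Type} (xs : List α) (ys : List β) (zs : List γ) (m k : Nat)
    (h1 : zs.length ≤ m) (h2 : zs.length ≤ k) :
    ((xs.take m).zip (ys.take k)).zip zs = (xs.zip ys).zip zs := by
  induction zs generalizing xs ys m k with
  | nil => simp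
  | cons z zs ih =>
      cases xs with
      | nil => simp
      | cons x xs =>
        cases ys with
        | nil => simp
        | cons y ys =>
          simp only [List.length_cons] at h1 h2
          obtain ⟨m', rfl⟩ : ∃ m', m = m' + 1 := ⟨m - 1, by omega⟩
          obtain ⟨k', rfl⟩ : ∃ k', k = k' + 1 := ⟨k - 1, by omega⟩
          simp only [List.take_succ_cons, List.zip_cons_cons]
          rw [ih xs ys m' k' (by omega) (by omega)]

theorem add_feature_trigram_left_spec' (tokens : List String) :
    add_feature_trigram_left tokens = add_feature_trigram_left_alt tokens := by
  match tokens with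
  | [] => rfl
  | [a] =>
      simp [add_feature_trigram_left, add_feature_trigram_left_alt, trigramGo,
        PySem.List.pyGetD]
  | [a, b] =>
      simp [add_feature_trigram_left, add_feature_trigram_left_alt, trigramGo,
        PySem.List.pyGetD, PySem.List.pyIdx?, PySem.List.pyGet?]
  | a :: b :: c :: rest =>
      have h3 : 2 < ((a :: b :: c :: rest).length : Int) := by simp; omega
      have hne : (a :: b :: c :: rest) ≠ [] := by simp
      rw [add_feature_trigram_left, if_neg hne]
      simp only [h3, if_pos]
      rw [PySem.List.slice_to_neg_ofNat _ 2 (by omega), PySem.List.slice_to_neg_one]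
      have hlen : (a :: b :: c :: rest).length ≠ 1 ∧ (a :: b :: c :: rest).length ≠ 2 := by
        simp
      rw [if_neg hlen.1, if_neg hlen.2]
      -- identify the shifted lists with truncations of the full shifted lists
      have e2 : ["BOS", "BOS"] ++ (a :: b :: c :: rest).take ((a :: b :: c :: rest).length - 2)
          = ("BOS" :: "BOS" :: a :: b :: c :: rest).take (a :: b :: c :: rest).length := by
        simp [List.take_succ_cons]
      have e1 : ["BOS"] ++ (a :: b :: c :: rest).dropLast
          = ("BOS" :: a :: b :: c :: rest).take (a :: b :: c :: rest).length := by
        simp [List.take_succ_cons, List.dropLast_eq_take]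
      rw [e2, e1, zip_take_take _ _ _ _ _ (le_refl _) (le_refl _)]
      rw [add_feature_trigram_left_alt, trigramGo_eq_zip]

-- ===== VERDICT (by name: the statement is the Claim_ definition above) =====
theorem add_feature_trigram_left_spec : Claim_equal_add_feature_trigram_left := by
  intro tokens _
  exact add_feature_trigram_left_spec' tokens
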